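-- pv_equiv track=rewrite | github.com/tuenguyenprograming1003/Game-8Rocks | Alg/forward_tracking.py | count_future_constraints
-- ===== SOURCE A (Python) =====
-- n = 8
--
-- def is_safe_forward(board, row, col):
--     """Kiểm tra xem có thể đặt quân xe tại (row, col) không"""
--     for i in range(row):
--         if board[i] == col:  # Cùng cột
--             return False
--     return True
--
-- def count_future_constraints(board, row, col, remaining_rows):
--     """Đếm số constraints mà việc đặt (row,col) sẽ tạo ra cho các hàng còn lại"""
--     temp_board = board.copy()
--     temp_board[row] = col
--
--     total_constraints = 0
--     for future_row in remaining_rows: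
--         if future_row != row:
--             constraints = 0
--             for future_col in range(n):
--                 if not is_safe_forward(temp_board, future_row, future_col):
--                     constraints += 1
--             total_constraints += constraints
--
--     return total_constraints
-- ===== SOURCE B (Python) =====
-- n = 8
--
-- def count_future_constraints(board, row, col, remaining_rows):
--     # Simpler: one prefix pass per future row maintaining a set of used
--     # in-range columns, instead of rescanning the prefix for each of the
--     # n candidate columns via is_safe_forward.
--     temp_board = board.copy()
--     temp_board[row] = col
--
--     total_constraints = 0
--     for future_row in remaining_rows:
--         if future_row != row:
--             used = set()
--             for i in range(future_row):
--                 v = temp_board[i]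
--                 if 0 <= v < n:
--                     used.add(v)
--             total_constraints += len(used)
--
--     return total_constraints
-- ===== Notes on version B (the rewrite author's own statement) =====
-- stated objective: faster
-- what changed: Instead of testing each of the 8 candidate columns with a per-column rescan of the board prefix (is_safe_forward), B makes a single pass over the prefix per future row, collecting the distinct in-range columns in a set and adding its size; this drops the factor-n rescan.
-- outside the precondition, e.g. on count_future_constraints([0, 1, 2, 3, 4, 5, 6, 7], 0, 0, [9]): A returns 8, B raises IndexError
import Mathlib
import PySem

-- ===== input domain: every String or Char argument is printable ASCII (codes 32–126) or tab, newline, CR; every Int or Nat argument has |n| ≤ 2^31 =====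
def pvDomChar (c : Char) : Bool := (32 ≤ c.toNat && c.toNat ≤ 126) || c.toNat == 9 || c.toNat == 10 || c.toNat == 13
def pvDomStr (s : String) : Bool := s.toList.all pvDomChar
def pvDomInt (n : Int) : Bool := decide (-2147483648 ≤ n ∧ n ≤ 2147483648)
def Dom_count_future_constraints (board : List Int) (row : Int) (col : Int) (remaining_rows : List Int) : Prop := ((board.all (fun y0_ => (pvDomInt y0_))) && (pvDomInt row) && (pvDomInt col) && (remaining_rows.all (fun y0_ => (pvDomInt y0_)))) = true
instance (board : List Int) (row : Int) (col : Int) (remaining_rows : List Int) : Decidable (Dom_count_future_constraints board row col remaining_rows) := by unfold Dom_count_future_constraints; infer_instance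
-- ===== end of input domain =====

-- B replaces A's per-candidate-column prefix rescan by one prefix pass per
-- future row that collects the distinct in-range columns in a set (objective:
-- simpler).

-- ===== PORT A =====
def is_safe_forward (board : List Int) (row : Int) (col : Int) : Bool :=
  (PySem.List.pyRange 0 row 1).all
    (fun i => !(PySem.List.pyGetD board i 0 == col))

def count_future_constraints (board : List Int) (row : Int) (col : Int) (remaining_rows : List Int) : Int :=
  let temp_board := PySem.List.pySetD board row col
  remaining_rows.foldl
    (fun total_constraints future_row =>
      if future_row ≠ row then
        total_constraints +
          (PySem.List.pyRange 0 8 1).foldl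
            (fun constraints future_col =>
              if !(is_safe_forward temp_board future_row future_col) then
                constraints + 1
              else constraints) 0
      else total_constraints) 0

-- ===== PORT B =====
def count_future_constraints_alt (board : List Int) (row : Int) (col : Int) (remaining_rows : List Int) : Int :=
  let temp_board := PySem.List.pySetD board row col
  remaining_rows.foldl
    (fun total_constraints future_row =>
      if future_row ≠ row then
        total_constraints +
          (((PySem.List.pyRange 0 future_row 1).foldl
              (fun (used : PySem.Set Int) i =>
                let v := PySem.List.pyGetD temp_board i 0
                if 0 ≤ v ∧ v < 8 then used.add v else used)
              PySem.Set.empty).length : Int)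
      else total_constraints) 0

-- ===== PRECONDITION & SPEC =====
-- Pre_ excludes inputs where Python raises IndexError: row out of range for the
-- assignment, and any future_row exceeding len(board) (there B's prefix scan
-- always raises, while A raises unless the board accidentally covers all 8
-- columns).
def Pre_count_future_constraints (board : List Int) (row : Int) (col : Int) (remaining_rows : List Int) : Prop :=
  PySem.Raise.InRange board.length row ∧
    ∀ r ∈ remaining_rows, r ≤ (board.length : Int)
instance (board : List Int) (row : Int) (col : Int) (remaining_rows : List Int) : Decidable (Pre_count_future_constraints board row col remaining_rows) := by unfold Pre_count_future_constraints; infer_instance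

def pvWitness_count_future_constraints : List Int × Int × Int × List Int :=
  ([3, 0, 5, 1], 1, 2, [2, 3, 0, 4])

def Spec_count_future_constraints (board : List Int) (row : Int) (col : Int) (remaining_rows : List Int) (out : Int) : Prop := out = count_future_constraints_alt board row col remaining_rows
instance (board : List Int) (row : Int) (col : Int) (remaining_rows : List Int) (out : Int) : Decidable (Spec_count_future_constraints board row col remaining_rows out) := by unfold Spec_count_future_constraints; infer_instance

-- ===== CLAIM (what is proved, stated in full; the proofs are below) =====
def Claim_equal_count_future_constraints : Prop := ∀ (board : List Int) (row : Int) (col : Int) (remaining_rows : List Int), Dom_count_future_constraints board row col remaining_rows → Pre_count_future_constraints board row col remaining_rows → Spec_count_future_constraints board row col remaining_rows (count_future_constraints board row col remaining_rows)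

-- ===== LEMMAS AND PROOFS =====

-- The set built by B's inner loop: no duplicates, and membership is
-- "some prefix index holds this in-range value".
theorem pv_set_step_nodup (tb : List Int) (l : List Int) (s : PySem.Set Int)
    (hs : s.Nodup) :
    (l.foldl
      (fun (used : PySem.Set Int) i =>
        let v := PySem.List.pyGetD tb i 0
        if 0 ≤ v ∧ v < 8 then used.add v else used) s).Nodup := by
  induction l generalizing s with
  | nil => exact hs
  | cons a l ih =>
    simp only [List.foldl_cons]
    split
    · exact ih _ (PySem.Set.nodup_add _ _ hs)
    · exact ih _ hs

theorem pv_set_step_mem (tb : List Int) (l : List Int) (s : PySem.Set Int) (x : Int) :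
    (x ∈ l.foldl
      (fun (used : PySem.Set Int) i =>
        let v := PySem.List.pyGetD tb i 0
        if 0 ≤ v ∧ v < 8 then used.add v else used) s) ↔
    (x ∈ s ∨ ∃ i ∈ l, PySem.List.pyGetD tb i 0 = x ∧ 0 ≤ x ∧ x < 8) := by
  induction l generalizing s with
  | nil => simp
  | cons a l ih =>
    simp only [List.foldl_cons, ih, List.mem_cons]
    split
    · rename_i h
      rw [PySem.Set.mem_add]
      constructor
      · rintro ((hx | rfl) | hx)
        · exact Or.inl hx
        · exact Or.inr ⟨a, Or.inl rfl, rfl, h⟩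
        · obtain ⟨i, hi, hv⟩ := hx; exact Or.inr ⟨i, Or.inr hi, hv⟩
      · rintro (hx | ⟨i, (rfl | hi), hv, hx⟩)
        · exact Or.inl (Or.inl hx)
        · exact Or.inl (Or.inr hv.symm)
        · exact Or.inr ⟨i, hi, hv, hx⟩
    · rename_i h
      constructor
      · rintro (hx | hx)
        · exact Or.inl hx
        · obtain ⟨i, hi, hv⟩ := hx; exact Or.inr ⟨i, Or.inr hi, hv⟩
      · rintro (hx | ⟨i, (rfl | hi), hv, hx1, hx2⟩)
        · exact Or.inl hx
        · exact absurd ⟨hv ▸ hx1, hv ▸ hx2⟩ h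
        · exact Or.inr ⟨i, hi, hv, hx1, hx2⟩

-- A's per-row count equals B's per-row set size.
theorem pv_inner_eq (tb : List Int) (k : Int) :
    (PySem.List.pyRange 0 8 1).foldl
        (fun constraints future_col =>
          if !(is_safe_forward tb k future_col) then constraints + 1
          else constraints) 0 =
    (((PySem.List.pyRange 0 k 1).foldl
        (fun (used : PySem.Set Int) i =>
          let v := PySem.List.pyGetD tb i 0
          if 0 ≤ v ∧ v < 8 then used.add v else used)
        PySem.Set.empty).length : Int) := by
  set S : PySem.Set Int :=
    (PySem.List.pyRange 0 k 1).foldl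
      (fun (used : PySem.Set Int) i =>
        let v := PySem.List.pyGetD tb i 0
        if 0 ≤ v ∧ v < 8 then used.add v else used)
      PySem.Set.empty with hS
  have hmemS : ∀ x, x ∈ S ↔
      (∃ i ∈ PySem.List.pyRange 0 k 1, PySem.List.pyGetD tb i 0 = x ∧ 0 ≤ x ∧ x < 8) := by
    intro x
    rw [hS, pv_set_step_mem]
    simp [PySem.Set.empty]
  have hnodupS : S.Nodup := pv_set_step_nodup tb _ _ (by simp [PySem.Set.empty])
  rw [PySem.List.foldl_if_add_one]
  have hcount : (PySem.List.pyRange 0 8 1).countP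
      (fun future_col => !(is_safe_forward tb k future_col)) =
      (PySem.List.pyRange 0 8 1).countP (fun c => decide (c ∈ S)) := by
    apply List.countP_congr
    intro c hc
    rw [PySem.List.mem_pyRange_one] at hc
    rw [Bool.eq_iff_iff]
    constructor
    · intro h
      have hx : ∃ i ∈ PySem.List.pyRange 0 k 1, PySem.List.pyGetD tb i 0 = c := by
        simpa [is_safe_forward] using h
      obtain ⟨i, hi, hv⟩ := hx
      rw [decide_eq_true_eq, hmemS]
      exact ⟨i, hi, hv, hc.1, hc.2⟩
    · intro h
      rw [decide_eq_true_eq, hmemS] at h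
      obtain ⟨i, hi, hv, _⟩ := h
      have hx : ∃ j ∈ PySem.List.pyRange 0 k 1, PySem.List.pyGetD tb j 0 = c := ⟨i, hi, hv⟩
      simpa [is_safe_forward] using hx
  rw [hcount, List.countP_eq_length_filter]
  have hperm : List.Perm ((PySem.List.pyRange 0 8 1).filter (fun c => decide (c ∈ S))) S := by
    rw [List.perm_ext_iff_of_nodup (List.Nodup.filter _ (PySem.List.nodup_pyRange_one 0 8))
      hnodupS]
    intro x
    simp only [List.mem_filter, decide_eq_true_eq, PySem.List.mem_pyRange_one]
    constructor
    · rintro ⟨_, hx⟩; exact hx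
    · intro hx
      obtain ⟨_, _, _, h0, h8⟩ := (hmemS x).mp hx
      exact ⟨⟨h0, h8⟩, hx⟩
  rw [hperm.length_eq]
  simp

-- ===== VERDICT (by name: the statement is the Claim_ definition above) =====
theorem count_future_constraints_spec : Claim_equal_count_future_constraints := by
  intro board row col remaining_rows _ _
  unfold Spec_count_future_constraints count_future_constraints count_future_constraints_alt
  apply PySem.List.foldl_congr_mem
  intro acc fr _
  by_cases h : fr = row
  · simp [h]
  · simp only [h, ne_eq, not_false_eq_true, if_true]
    rw [pv_inner_eq]
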